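-- pv_equiv track=rewrite | github.com/saadAw/excersim-python | solutions/python/locomotive-engineer/1/locomotive_engineer.py | fix_wagon_depot
-- ===== SOURCE A (Python) =====
-- def fix_wagon_depot(wagons_rows):
--     """Fix the list of rows of wagons.
--
--     :param wagons_rows: list[list[tuple]] - the list of rows of wagons.
--     :return: list[list[tuple]] - list of rows of wagons.
--     """
--
--     different_colors = []
--
--     for row in wagons_rows:
--         for color in row:
--             if color[1] not in different_colors:
--                 different_colors.append(color[1])
--
--     color_counter = {color: 0 for color in different_colors}
--     column_counter = {color: idx for idx, color in enumerate(different_colors)}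
--
--
--     new_list = [[None, None, None] for _ in range(3)]
--
--     for row in wagons_rows:
--         for color in row:
--             new_list[color_counter[color[1]]][column_counter[color[1]]] = color
--             color_counter[color[1]] += 1
--
--
--     return new_list
-- ===== SOURCE B (Python) =====
-- def fix_wagon_depot(wagons_rows):
--     """Fix the list of rows of wagons.
--
--     Output-directed construction: cell (r, c) of the 3x3 result is the r-th
--     wagon (in flattened order) of the c-th first-seen color, found by
--     filtering the flattened wagon list; no mutation, no counters.
--     """
--     flat = [wagon for row in wagons_rows for wagon in row]
--     colors = list(dict.fromkeys(wagon[1] for wagon in flat))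
--
--     def cell(r, c):
--         if c >= len(colors):
--             return None
--         group = [wagon for wagon in flat if wagon[1] == colors[c]]
--         return group[r] if r < len(group) else None
--
--     return [[cell(r, c) for c in range(3)] for r in range(3)]
-- ===== Notes on version B (the rewrite author's own statement) =====
-- stated objective: alternative
-- what changed: B is output-directed: it computes each of the 9 grid cells directly as 'the r-th wagon of the c-th first-seen color' by filtering the flattened wagon list, instead of A's input-directed mutation loop that re-scans the rows and places every wagon into a preallocated grid using per-color occurrence counters and a column-index dict.
import Mathlib
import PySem

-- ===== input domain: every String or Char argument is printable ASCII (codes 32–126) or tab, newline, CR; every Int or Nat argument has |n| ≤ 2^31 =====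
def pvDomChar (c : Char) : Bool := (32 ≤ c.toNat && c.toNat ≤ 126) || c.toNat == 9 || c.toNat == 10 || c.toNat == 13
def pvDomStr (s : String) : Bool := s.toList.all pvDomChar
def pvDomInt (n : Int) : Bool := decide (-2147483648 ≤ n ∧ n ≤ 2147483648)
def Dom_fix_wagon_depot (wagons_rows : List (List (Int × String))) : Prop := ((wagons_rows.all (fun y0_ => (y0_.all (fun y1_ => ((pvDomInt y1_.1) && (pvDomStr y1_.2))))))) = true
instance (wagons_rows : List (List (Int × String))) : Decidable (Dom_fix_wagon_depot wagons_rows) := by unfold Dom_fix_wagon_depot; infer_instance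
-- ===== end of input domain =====

-- B builds the 3x3 output cell by cell (cell (r,c) = r-th wagon of the c-th first-seen
-- color, found by filtering the flattened wagon list) instead of A's mutation loop with
-- per-color counters; objective: alternative (output-directed vs input-directed).

-- `new_list[r][c] = w` on the 3x3 grid (used by port A).  Exact for the in-range
-- indices Pre_ guarantees (0 ≤ r, c < 3); where Python would raise IndexError
-- (excluded by Pre_) it is a no-op.
def pvSetCell (g : List (List (Option (Int × String)))) (r c : Int) (w : Int × String) :
    List (List (Option (Int × String))) :=
  if r < 0 ∨ c < 0 then g
  else g.set r.toNat ((g.getD r.toNat []).set c.toNat (some w))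

-- ===== PORT A =====
def fix_wagon_depot (wagons_rows : List (List (Int × String))) : List (List (Option (Int × String))) :=
  let different_colors : List String :=
    wagons_rows.foldl (fun acc row =>
      row.foldl (fun acc color =>
        if acc.contains color.2 then acc else acc ++ [color.2]) acc) []
  let color_counter : PySem.Dict String Int :=
    different_colors.foldl (fun d c => d.insert c 0) PySem.Dict.empty
  let column_counter : PySem.Dict String Int :=
    (PySem.List.enumerate different_colors).foldl (fun d p => d.insert p.2 p.1) PySem.Dict.empty
  let init : List (List (Option (Int × String))) :=
    [[none, none, none], [none, none, none], [none, none, none]]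
  let res :=
    wagons_rows.foldl (fun (st : List (List (Option (Int × String))) × PySem.Dict String Int) row =>
      row.foldl (fun st color =>
        (pvSetCell st.1 (st.2.getD color.2 0) (column_counter.getD color.2 0) color,
         st.2.insert color.2 (st.2.getD color.2 0 + 1))) st) (init, color_counter)
  res.1

-- ===== PORT B =====
-- Source B's inner function `cell(r, c)` (its closed-over locals passed explicitly)
def pvBcell (flat : List (Int × String)) (colors : List String) (r c : Nat) : Option (Int × String) :=
  if h : c < colors.length then
    let group := flat.filter (fun w => w.2 == colors[c])
    if h2 : r < group.length then some group[r] else none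
  else none

def fix_wagon_depot_alt (wagons_rows : List (List (Int × String))) : List (List (Option (Int × String))) :=
  let flat : List (Int × String) := wagons_rows.flatMap (fun row => row)
  let colors : List String := PySem.Set.ofList (flat.map (fun w => w.2))
  (List.range 3).map (fun r => (List.range 3).map (fun c => pvBcell flat colors r c))

-- ===== PRECONDITION & SPEC =====
-- Exactly the inputs on which Python's A returns: more than 3 distinct colors, or more
-- than 3 wagons of one color, makes A raise IndexError on the 3x3 grid.
def Pre_fix_wagon_depot (wagons_rows : List (List (Int × String))) : Prop :=
  (wagons_rows.flatten.map Prod.snd).dedup.length ≤ 3 ∧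
  ∀ c ∈ wagons_rows.flatten.map Prod.snd, (wagons_rows.flatten.map Prod.snd).count c ≤ 3
instance (wagons_rows : List (List (Int × String))) : Decidable (Pre_fix_wagon_depot wagons_rows) := by
  unfold Pre_fix_wagon_depot; infer_instance

def pvWitness_fix_wagon_depot : (List (List (Int × String))) :=
  [[(1, "red"), (2, "blue")], [(3, "red"), (4, "green")]]

def Spec_fix_wagon_depot (wagons_rows : List (List (Int × String))) (out : List (List (Option (Int × String)))) : Prop := out = fix_wagon_depot_alt wagons_rows
instance (wagons_rows : List (List (Int × String))) (out : List (List (Option (Int × String)))) : Decidable (Spec_fix_wagon_depot wagons_rows out) := by unfold Spec_fix_wagon_depot; infer_instance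

-- ===== CLAIM (what is proved, stated in full; the proofs are below) =====
def Claim_equal_fix_wagon_depot : Prop := ∀ (wagons_rows : List (List (Int × String))), Dom_fix_wagon_depot wagons_rows → Pre_fix_wagon_depot wagons_rows → Spec_fix_wagon_depot wagons_rows (fix_wagon_depot wagons_rows)

-- ===== LEMMAS AND PROOFS =====

-- abbreviations for the proofs
abbrev pvGrid := List (List (Option (Int × String)))
abbrev pvW := Int × String

-- one write (rowIdx, colIdx, wagon) applied to the grid
def pvStep (g : pvGrid) (t : Int × Int × pvW) : pvGrid := pvSetCell g t.1 t.2.1 t.2.2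

-- A's write list: each wagon tagged with its running per-color count and its column
def pvTag (cnt : String → Int) (cm : String → Int) : List pvW → List (Int × Int × pvW)
  | [] => []
  | w :: t => (cnt w.2, cm w.2, w) :: pvTag (fun c => if c = w.2 then cnt c + 1 else cnt c) cm t

-- one color block: rows r, r+1, … of column j
def pvCol (r j : Int) : List pvW → List (Int × Int × pvW)
  | [] => []
  | w :: t => (r, j, w) :: pvCol (r + 1) j t

lemma pvGetD_set_ne {a : Type} (l : List a) (i j : Nat) (x d : a) (h : i ≠ j) :
    (l.set i x).getD j d = l.getD j d := by
  simp [List.getD_eq_getElem?_getD, List.getElem?_set_ne h]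

-- ---- grid-write commutation ----
lemma pvSetCell_comm (g : pvGrid) (r1 c1 r2 c2 : Int) (w1 w2 : pvW)
    (h : ¬(r1 = r2 ∧ c1 = c2)) :
    pvSetCell (pvSetCell g r1 c1 w1) r2 c2 w2 = pvSetCell (pvSetCell g r2 c2 w2) r1 c1 w1 := by
  unfold pvSetCell
  by_cases h1 : r1 < 0 ∨ c1 < 0
  · by_cases h2 : r2 < 0 ∨ c2 < 0 <;> simp [h1, h2]
  · by_cases h2 : r2 < 0 ∨ c2 < 0
    · simp [h1, h2]
    · simp only [if_neg h1, if_neg h2]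
      push Not at h1 h2
      by_cases hr : r1.toNat = r2.toNat
      · have hre : r1 = r2 := by omega
        subst hre
        have hc : c1.toNat ≠ c2.toNat := by
          intro hcn; exact h ⟨rfl, by omega⟩
        by_cases hi : r1.toNat < g.length
        · rw [List.set_set, List.set_set]
          have hget : ∀ (X : List (Option (Int × String))),
              ((g.set r1.toNat X).getD r1.toNat []) = X := by
            intro X
            rw [List.getD_eq_getElem _ _ (by simpa using hi)]
            simp
          rw [hget, hget, List.set_comm _ _ hc]
        · have hle : g.length ≤ r1.toNat := by omega
          have hset : ∀ (X : List (Option (Int × String))), g.set r1.toNat X = g :=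
            fun X => List.set_eq_of_length_le hle
          simp only [hset]
      · rw [pvGetD_set_ne _ _ _ _ _ hr, pvGetD_set_ne _ _ _ _ _ (Ne.symm hr),
            List.set_comm _ _ hr]

-- ---- A's loop is a fold of pvStep over pvTag ----
lemma pvA_loop (ws : List pvW) (cm : PySem.Dict String Int) (g : pvGrid)
    (d : PySem.Dict String Int) (cnt : String → Int) (hd : ∀ c, d.getD c 0 = cnt c) :
    (ws.foldl (fun st (color : pvW) =>
        (pvSetCell st.1 (st.2.getD color.2 0) (cm.getD color.2 0) color,
         st.2.insert color.2 (st.2.getD color.2 0 + 1))) (g, d)).1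
      = (pvTag cnt (fun c => cm.getD c 0) ws).foldl pvStep g := by
  induction ws generalizing g d cnt with
  | nil => rfl
  | cons w t ih =>
    simp only [List.foldl_cons, pvTag]
    rw [hd w.2]
    exact ih _ _ _ (fun c => by
      rw [PySem.Dict.getD_insert]
      split_ifs with hc
      · subst hc; rfl
      · exact hd c)

lemma pvTag_congr (ws : List pvW) (cnt cm1 cm2 : String → Int)
    (h : ∀ w ∈ ws, cm1 w.2 = cm2 w.2) : pvTag cnt cm1 ws = pvTag cnt cm2 ws := by
  induction ws generalizing cnt with
  | nil => rfl
  | cons w t ih =>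
    simp only [pvTag, h w (by simp)]
    rw [ih _ (fun x hx => h x (by simp [hx]))]

lemma pvTag_mem (ws : List pvW) (cnt cm : String → Int) (x : Int × Int × pvW)
    (hx : x ∈ pvTag cnt cm ws) : x.2.2 ∈ ws := by
  induction ws generalizing cnt with
  | nil => simp [pvTag] at hx
  | cons w t ih =>
    simp only [pvTag, List.mem_cons] at hx
    rcases hx with h | h
    · subst h; simp
    · simp [ih _ h]

-- ---- per-color characterisations ----
lemma pvTag_filter (ws : List pvW) (cnt cm : String → Int) (c : String) :
    (pvTag cnt cm ws).filter (fun t => t.2.2.2 == c)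
      = pvCol (cnt c) (cm c) (ws.filter (fun w => w.2 == c)) := by
  induction ws generalizing cnt with
  | nil => rfl
  | cons w t ih =>
    by_cases hc : w.2 = c
    · have hb : (w.2 == c) = true := by simpa using hc
      simp only [pvTag, List.filter_cons, hb, if_true, ih, pvCol]
      subst hc
      simp
    · have hb : (w.2 == c) = false := by simpa using hc
      have hc' : ¬(c = w.2) := fun h => hc h.symm
      simp only [pvTag, List.filter_cons, hb, Bool.false_eq_true, if_false, ih]
      simp [hc']

lemma pvMem_pvCol (l : List pvW) (r j : Int) (x : Int × Int × pvW) (hx : x ∈ pvCol r j l) :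
    ∃ k : Nat, ∃ hk : k < l.length, x = (r + k, j, l[k]) := by
  induction l generalizing r with
  | nil => simp [pvCol] at hx
  | cons w t ih =>
    simp only [pvCol, List.mem_cons] at hx
    rcases hx with h | h
    · exact ⟨0, by simp, by simpa using h⟩
    · obtain ⟨k, hk, hx⟩ := ih _ h
      refine ⟨k + 1, by simpa using hk, ?_⟩
      simp only [hx, List.getElem_cons_succ]
      congr 1
      push_cast
      ring

lemma pvCol_mem (l : List pvW) (r j : Int) (k : Nat) (hk : k < l.length) :
    (r + (k : Int), j, l[k]) ∈ pvCol r j l := by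
  induction l generalizing r k with
  | nil => simp at hk
  | cons w t ih =>
    cases k with
    | zero => simp [pvCol]
    | succ k =>
      have := ih (r + 1) k (by simpa using hk)
      simp only [pvCol, List.mem_cons, List.getElem_cons_succ]
      right
      have harith : r + ((k : Int) + 1) = r + 1 + (k : Int) := by ring
      push_cast
      rw [harith]
      exact this

-- partition of a list over a nodup list of keys covering it
lemma pvFlatMap_congr {a b : Type} (l : List a) (f g : a → List b)
    (h : ∀ x ∈ l, f x = g x) : l.flatMap f = l.flatMap g := by
  induction l with
  | nil => rfl
  | cons x t ih =>
    simp only [List.flatMap_cons, h x (by simp)]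
    rw [ih (fun y hy => h y (by simp [hy]))]

lemma pvPerm_partition {a : Type} (key : a → String) :
    ∀ (keys : List String) (l : List a), keys.Nodup → (∀ x ∈ l, key x ∈ keys) →
      l.Perm (keys.flatMap (fun c => l.filter (fun x => key x == c))) := by
  intro keys
  induction keys with
  | nil =>
    intro l _ hcov
    cases l with
    | nil => simp
    | cons x t => exact absurd (hcov x (by simp)) (by simp)
  | cons c ks ih =>
    intro l hnd hcov
    simp only [List.flatMap_cons]
    have hperm : (l.filter (fun x => key x == c) ++
        l.filter (fun x => !(key x == c))).Perm l :=
      List.filter_append_perm _ l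
    refine hperm.symm.trans (List.Perm.append_left _ ?_)
    have hcov' : ∀ x ∈ l.filter (fun x => !(key x == c)), key x ∈ ks := by
      intro x hx
      rw [List.mem_filter] at hx
      have := hcov x hx.1
      simp only [List.mem_cons] at this
      rcases this with h | h
      · exact absurd (by simpa using h) (by simpa using hx.2)
      · exact h
    have hperm2 := ih (l.filter (fun x => !(key x == c))) hnd.of_cons hcov'
    have heq : (ks.flatMap fun c' => (l.filter (fun x => !(key x == c))).filter (fun x => key x == c'))
        = ks.flatMap fun c' => l.filter (fun x => key x == c') := by
      apply pvFlatMap_congr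
      intro c' hc'
      have hne : c' ≠ c := by rintro rfl; exact (List.nodup_cons.mp hnd).1 hc'
      rw [List.filter_filter]
      apply List.filter_congr
      intro x _
      by_cases hx : key x = c'
      · simp [hx, hne]
      · simp [hx]
    exact hperm2.trans (heq ▸ List.Perm.refl _)

-- canonical pieces shared by the two halves of the proof
abbrev pvS (rows : List (List pvW)) : List String := PySem.Set.ofList (rows.flatten.map Prod.snd)
abbrev pvInit : pvGrid := [[none, none, none], [none, none, none], [none, none, none]]
abbrev pvFil (rows : List (List pvW)) (c : String) : List pvW :=
  rows.flatten.filter (fun w => w.2 == c)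
abbrev pvLA (rows : List (List pvW)) : List (Int × Int × pvW) :=
  pvTag (fun _ => 0) (fun c => ((pvS rows).idxOf c : Int)) rows.flatten
abbrev pvLB (rows : List (List pvW)) : List (Int × Int × pvW) :=
  (pvS rows).flatMap (fun c => pvCol 0 ((pvS rows).idxOf c : Int) (pvFil rows c))

lemma pvZero (Sl : List String) (d : PySem.Dict String Int)
    (h : ∀ c, d.getD c 0 = 0) (c : String) :
    (Sl.foldl (fun d c => d.insert c 0) d).getD c 0 = 0 := by
  induction Sl generalizing d with
  | nil => exact h c
  | cons k t ih =>
    simp only [List.foldl_cons]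
    exact ih _ (fun c' => by rw [PySem.Dict.getD_insert]; split_ifs <;> simp [h])

lemma pvColDict (S : List String) (hnd : S.Nodup) (c : String) (hc : c ∈ S) :
    ((PySem.List.enumerate S 0).foldl (fun d p => d.insert p.2 p.1)
        (PySem.Dict.empty : PySem.Dict String Int)).getD c 0 = (S.idxOf c : Int) := by
  have hfresh : ∀ p ∈ PySem.List.enumerate S 0,
      (PySem.Dict.empty : PySem.Dict String Int).contains p.2 = false := by
    intro p _; simp [PySem.Dict.contains_empty]
  have hkn : ((PySem.List.enumerate S 0).map (fun p => p.2)).Nodup := by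
    rw [PySem.List.map_snd_enumerate]; exact hnd
  have hitems := PySem.Dict.items_foldl_insert_fresh (PySem.List.enumerate S 0)
    (fun p => p.2) (fun p => p.1) PySem.Dict.empty hfresh hkn
  have hkeys : ((PySem.List.enumerate S 0).foldl (fun d p => d.insert p.2 p.1)
      (PySem.Dict.empty : PySem.Dict String Int)).keys.Nodup := by
    have hk : (List.foldl (fun d p => d.insert p.2 p.1)
        (PySem.Dict.empty : PySem.Dict String Int) (PySem.List.enumerate S 0)).keys = S := by
      simp only [PySem.Dict.keys, hitems, List.map_append, List.map_map]
      rw [show (PySem.Dict.empty : PySem.Dict String Int).items = [] from rfl]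
      simp [Function.comp_def, PySem.List.map_snd_enumerate]
    rw [hk]
    exact hnd
  have hmem : (c, (S.idxOf c : Int)) ∈ ((PySem.List.enumerate S 0).foldl
      (fun d p => d.insert p.2 p.1) (PySem.Dict.empty : PySem.Dict String Int)).items := by
    rw [hitems]
    have hlt := List.idxOf_lt_length_of_mem hc
    have hmm : ((0 : Int) + (S.idxOf c : Nat), S[S.idxOf c]) ∈ PySem.List.enumerate S 0 := by
      rw [PySem.List.mem_enumerate_iff]
      exact ⟨S.idxOf c, hlt, rfl⟩
    have hx := List.mem_map_of_mem (f := fun p : Int × String => (p.2, p.1)) hmm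
    refine List.mem_append.mpr (Or.inr ?_)
    simpa [List.getElem_idxOf hlt] using hx
  exact PySem.Dict.getD_of_mem_items _ hmem hkeys 0

-- ---- A reduced to a fold of pvStep over its write list ----
lemma pvA_eq (rows : List (List pvW)) : fix_wagon_depot rows = (pvLA rows).foldl pvStep pvInit := by
  simp only [fix_wagon_depot]
  have hfs : rows.foldl (fun acc row =>
      row.foldl (fun acc (color : pvW) =>
        if acc.contains color.2 then acc else acc ++ [color.2]) acc) [] = pvS rows := by
    rw [← List.foldl_flatten,
        ← List.foldl_map (f := fun w : pvW => w.2)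
          (g := fun (acc : List String) c => if acc.contains c then acc else acc ++ [c])]
    rfl
  rw [hfs, ← List.foldl_flatten]
  rw [pvA_loop rows.flatten _ pvInit _ (fun _ => 0)
    (fun c => pvZero (pvS rows) PySem.Dict.empty (fun c' => by simp [PySem.Dict.getD_empty]) c)]
  unfold pvLA
  congr 1
  apply pvTag_congr
  intro w hw
  have hmem : w.2 ∈ pvS rows := by
    rw [pvS, PySem.Set.mem_ofList]
    exact List.mem_map_of_mem hw
  exact pvColDict (pvS rows) (PySem.Set.nodup_ofList _) w.2 hmem

-- ---- the two write lists are a permutation of each other ----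
lemma pvPermAB (rows : List (List pvW)) : (pvLA rows).Perm (pvLB rows) := by
  have hpart := pvPerm_partition (fun t : Int × Int × pvW => t.2.2.2) (pvS rows)
    (pvLA rows) (PySem.Set.nodup_ofList _) ?hcov
  case hcov =>
    intro x hx
    rw [pvS, PySem.Set.mem_ofList]
    exact List.mem_map_of_mem (pvTag_mem _ _ _ _ hx)
  refine hpart.trans ?_
  unfold pvLB
  rw [pvFlatMap_congr]
  intro c _
  unfold pvLA
  rw [pvTag_filter]

-- each write in B's list is row k of the column of its color
lemma pvMem_LB (rows : List (List pvW)) (x : Int × Int × pvW) (hx : x ∈ pvLB rows) :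
    ∃ c ∈ pvS rows, ∃ k : Nat, ∃ hk : k < (pvFil rows c).length,
      x = ((k : Int), ((pvS rows).idxOf c : Int), (pvFil rows c)[k]) := by
  rw [pvLB, List.mem_flatMap] at hx
  obtain ⟨c, hc, hx⟩ := hx
  obtain ⟨k, hk, hx⟩ := pvMem_pvCol _ _ _ _ hx
  exact ⟨c, hc, k, hk, by simpa using hx⟩

lemma pvLB_mem (rows : List (List pvW)) (c : String) (hc : c ∈ pvS rows) (k : Nat)
    (hk : k < (pvFil rows c).length) :
    ((k : Int), ((pvS rows).idxOf c : Int), (pvFil rows c)[k]) ∈ pvLB rows := by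
  rw [pvLB, List.mem_flatMap]
  refine ⟨c, hc, ?_⟩
  have := pvCol_mem (pvFil rows c) 0 ((pvS rows).idxOf c : Int) k hk
  simpa using this

-- same cell ⇒ same write, inside pvLB
lemma pvLB_inj (rows : List (List pvW)) :
    ∀ x ∈ pvLB rows, ∀ y ∈ pvLB rows, x.1 = y.1 → x.2.1 = y.2.1 → x = y := by
  intro x hx y hy hr hc
  obtain ⟨c1, hc1, k1, hk1, hx1⟩ := pvMem_LB rows x hx
  obtain ⟨c2, hc2, k2, hk2, hy1⟩ := pvMem_LB rows y hy
  rw [hx1, hy1] at hr hc ⊢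
  simp only at hr hc
  have hidx : (pvS rows).idxOf c1 = (pvS rows).idxOf c2 := by exact_mod_cast hc
  have hceq : c1 = c2 := by
    rw [← List.getElem_idxOf (List.idxOf_lt_length_of_mem hc1),
        ← List.getElem_idxOf (List.idxOf_lt_length_of_mem hc2)]
    simp only [hidx]
  subst hceq
  have hkeq : k1 = k2 := by exact_mod_cast hr
  subst hkeq
  rfl

-- distinct writes of pvLA go to distinct cells, so they commute
lemma pvComm (rows : List (List pvW)) :
    ∀ x ∈ pvLA rows, ∀ y ∈ pvLA rows, ∀ g,
      pvStep (pvStep g x) y = pvStep (pvStep g y) x := by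
  intro x hx y hy g
  by_cases hxy : x = y
  · rw [hxy]
  · show pvSetCell (pvSetCell g x.1 x.2.1 x.2.2) y.1 y.2.1 y.2.2
        = pvSetCell (pvSetCell g y.1 y.2.1 y.2.2) x.1 x.2.1 x.2.2
    apply pvSetCell_comm
    rintro ⟨hr, hc⟩
    exact hxy (pvLB_inj rows x ((pvPermAB rows).mem_iff.mp hx)
      y ((pvPermAB rows).mem_iff.mp hy) hr hc)

-- ---- cell-level view of a grid ----
def pvGetCell (g : pvGrid) (r c : Nat) : Option pvW := (g.getD r []).getD c none

def pvShape (g : pvGrid) : Prop := g.length = 3 ∧ ∀ row ∈ g, row.length = 3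

lemma pvShape_init : pvShape pvInit := by
  constructor
  · rfl
  · intro row hrow
    simp only [pvInit, List.mem_cons, List.not_mem_nil, or_false] at hrow
    rcases hrow with h | h | h <;> subst h <;> rfl

lemma pvShape_set (g : pvGrid) (hg : pvShape g) (r c : Int) (w : pvW) :
    pvShape (pvSetCell g r c w) := by
  unfold pvSetCell
  split_ifs with h
  · exact hg
  · by_cases hi : r.toNat < g.length
    · refine ⟨by simpa using hg.1, ?_⟩
      intro row hrow
      rcases List.mem_or_eq_of_mem_set hrow with hmem | heq
      · exact hg.2 row hmem
      · subst heq
        rw [List.length_set]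
        rw [List.getD_eq_getElem _ _ hi]
        exact hg.2 _ (List.getElem_mem hi)
    · rw [List.set_eq_of_length_le (by omega)]
      exact hg

lemma pvGetCell_set (g : pvGrid) (hg : pvShape g) (r c : Int) (w : pvW)
    (hr0 : 0 ≤ r) (hr3 : r < 3) (hc0 : 0 ≤ c) (hc3 : c < 3) (r' c' : Nat) :
    pvGetCell (pvSetCell g r c w) r' c'
      = if r.toNat = r' ∧ c.toNat = c' then some w else pvGetCell g r' c' := by
  have hnn : ¬(r < 0 ∨ c < 0) := by omega
  have hi : r.toNat < g.length := by have := hg.1; omega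
  have hrowlen : (g.getD r.toNat []).length = 3 := by
    rw [List.getD_eq_getElem _ _ hi]
    exact hg.2 _ (List.getElem_mem hi)
  unfold pvSetCell pvGetCell
  rw [if_neg hnn]
  by_cases hrr : r.toNat = r'
  · subst hrr
    have h1 : (g.set r.toNat ((g.getD r.toNat []).set c.toNat (some w))).getD r.toNat []
        = (g.getD r.toNat []).set c.toNat (some w) := by
      rw [List.getD_eq_getElem _ _ (by simpa using hi)]
      simp
    rw [h1]
    by_cases hcc : c.toNat = c'
    · subst hcc
      rw [if_pos ⟨rfl, rfl⟩]
      rw [List.getD_eq_getElem _ _ (by rw [List.length_set, hrowlen]; omega),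
          List.getElem_set_self]
    · rw [if_neg (by tauto), pvGetD_set_ne _ _ _ _ _ hcc]
  · rw [if_neg (by tauto), pvGetD_set_ne _ _ _ _ _ hrr]

-- at most one write per cell ⇒ find? locates the unique write
lemma pvFind_unique {a : Type} (p : a → Bool) (L : List a)
    (hu : ∀ x ∈ L, ∀ y ∈ L, p x → p y → x = y)
    (t : a) (ht : t ∈ L) (hp : p t) : L.find? p = some t := by
  induction L with
  | nil => simp at ht
  | cons a L' ih =>
    by_cases hpa : p a
    · rw [List.find?_cons_of_pos hpa]
      rcases List.mem_cons.mp ht with h | h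
      · rw [h]
      · rw [hu a (by simp) t (by simp [h]) hpa hp]
    · rw [List.find?_cons_of_neg hpa]
      rcases List.mem_cons.mp ht with h | h
      · subst h; exact absurd hp hpa
      · exact ih (fun x hx y hy => hu x (by simp [hx]) y (by simp [hy])) h

-- the fold of in-range, cell-unique writes, read back cell by cell
lemma pvGetCell_foldl (L : List (Int × Int × pvW)) (g : pvGrid) (hg : pvShape g)
    (hran : ∀ x ∈ L, 0 ≤ x.1 ∧ x.1 < 3 ∧ 0 ≤ x.2.1 ∧ x.2.1 < 3)
    (hu : ∀ x ∈ L, ∀ y ∈ L, x.1 = y.1 → x.2.1 = y.2.1 → x = y)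
    (r c : Nat) :
    pvGetCell (L.foldl pvStep g) r c =
      match L.find? (fun t => t.1 == (r : Int) && t.2.1 == (c : Int)) with
      | some t => some t.2.2
      | none => pvGetCell g r c := by
  induction L generalizing g with
  | nil => rfl
  | cons t L' ih =>
    have hrant := hran t (by simp)
    have ihg := ih (pvStep g t) (pvShape_set g hg _ _ _)
      (fun x hx => hran x (by simp [hx]))
      (fun x hx y hy => hu x (by simp [hx]) y (by simp [hy]))
    simp only [List.foldl_cons]
    rw [ihg]
    by_cases hpt : (t.1 == (r : Int) && t.2.1 == (c : Int)) = true
    · have hteq : t.1 = (r : Int) ∧ t.2.1 = (c : Int) := by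
        constructor <;> [exact beq_iff_eq.mp (Bool.and_elim_left hpt);
          exact beq_iff_eq.mp (Bool.and_elim_right hpt)]
      rw [List.find?_cons_of_pos (p := fun t : Int × Int × pvW => t.1 == (r : Int) && t.2.1 == (c : Int)) hpt]
      cases hfind : L'.find? (fun t => t.1 == (r : Int) && t.2.1 == (c : Int)) with
      | some u =>
        have humem := List.mem_of_find?_eq_some hfind
        have hpu := List.find?_some hfind
        have hueq : u.1 = (r : Int) ∧ u.2.1 = (c : Int) := by
          constructor <;> [exact beq_iff_eq.mp (Bool.and_elim_left hpu);
            exact beq_iff_eq.mp (Bool.and_elim_right hpu)]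
        have : t = u := hu t (by simp) u (by simp [humem])
          (by rw [hteq.1, hueq.1]) (by rw [hteq.2, hueq.2])
        simp [this]
      | none =>
        show pvGetCell (pvStep g t) r c = some t.2.2
        unfold pvStep
        rw [pvGetCell_set g hg _ _ _ hrant.1 hrant.2.1 hrant.2.2.1 hrant.2.2.2]
        obtain ⟨he1, he2⟩ := hteq
        rw [if_pos ⟨by omega, by omega⟩]
    · rw [List.find?_cons_of_neg (p := fun t : Int × Int × pvW => t.1 == (r : Int) && t.2.1 == (c : Int)) hpt]
      cases hfind : L'.find? (fun t => t.1 == (r : Int) && t.2.1 == (c : Int)) with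
      | some u => rfl
      | none =>
        show pvGetCell (pvStep g t) r c = pvGetCell g r c
        unfold pvStep
        rw [pvGetCell_set g hg _ _ _ hrant.1 hrant.2.1 hrant.2.2.1 hrant.2.2.2]
        rw [if_neg]
        rintro ⟨h1, h2⟩
        apply hpt
        have e1 : t.1 = (r : Int) := by omega
        have e2 : t.2.1 = (c : Int) := by omega
        simp [e1, e2]

lemma pvShape_foldl (L : List (Int × Int × pvW)) (g : pvGrid) (hg : pvShape g) :
    pvShape (L.foldl pvStep g) := by
  induction L generalizing g with
  | nil => exact hg
  | cons t L' ih => exact ih _ (pvShape_set g hg _ _ _)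

lemma pvGrid_ext (g1 g2 : pvGrid) (h1 : pvShape g1) (h2 : pvShape g2)
    (h : ∀ r c : Nat, r < 3 → c < 3 → pvGetCell g1 r c = pvGetCell g2 r c) : g1 = g2 := by
  apply List.ext_getElem (by rw [h1.1, h2.1])
  intro i hi1 hi2
  have hL1 := h1.1
  have hi3 : i < 3 := by omega
  have hl1 : g1[i].length = 3 := h1.2 _ (List.getElem_mem hi1)
  have hl2 : g2[i].length = 3 := h2.2 _ (List.getElem_mem hi2)
  apply List.ext_getElem (by rw [hl1, hl2])
  intro j hj1 hj2
  have hj3 : j < 3 := by omega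
  have := h i j hi3 hj3
  unfold pvGetCell at this
  rw [List.getD_eq_getElem _ _ hi1, List.getD_eq_getElem _ _ hi2,
      List.getD_eq_getElem _ _ hj1, List.getD_eq_getElem _ _ hj2] at this
  exact this

lemma pvGetCell_init (r c : Nat) (hr : r < 3) (hc : c < 3) :
    pvGetCell pvInit r c = none := by
  interval_cases r <;> interval_cases c <;> rfl

-- ---- B, cell by cell ----
lemma pvFlat_eq (rows : List (List pvW)) : rows.flatMap (fun row => row) = rows.flatten := by
  simp [List.flatMap_def]

lemma pvAlt_shape (rows : List (List pvW)) : pvShape (fix_wagon_depot_alt rows) := by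
  unfold fix_wagon_depot_alt
  refine ⟨by simp, ?_⟩
  intro row hrow
  simp only [List.mem_map] at hrow
  obtain ⟨r, _, hrow⟩ := hrow
  rw [← hrow]
  simp

lemma pvAlt_cell (rows : List (List pvW)) (r c : Nat) (hr : r < 3) (hc : c < 3) :
    pvGetCell (fix_wagon_depot_alt rows) r c = pvBcell rows.flatten (pvS rows) r c := by
  have hflat : fix_wagon_depot_alt rows
      = (List.range 3).map (fun r => (List.range 3).map (fun c =>
          pvBcell rows.flatten (pvS rows) r c)) := by
    simp only [fix_wagon_depot_alt, pvFlat_eq]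
  rw [hflat]
  unfold pvGetCell
  interval_cases r <;> interval_cases c <;> rfl

-- ===== VERDICT (by name: the statement is the Claim_ definition above) =====
theorem fix_wagon_depot_spec : Claim_equal_fix_wagon_depot := by
  intro rows _ hpre
  unfold Spec_fix_wagon_depot
  -- Pre_ bounds transported to pvS / pvFil
  have hSperm : (pvS rows).Perm ((rows.flatten.map Prod.snd).dedup) :=
    (List.perm_ext_iff_of_nodup (PySem.Set.nodup_ofList _) (List.nodup_dedup _)).mpr
      (fun a => by rw [PySem.Set.mem_ofList, List.mem_dedup])
  have hS3 : (pvS rows).length ≤ 3 := by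
    rw [hSperm.length_eq]; exact hpre.1
  have hFil3 : ∀ c ∈ pvS rows, (pvFil rows c).length ≤ 3 := by
    intro c hc
    have hcm : c ∈ rows.flatten.map Prod.snd := (PySem.Set.mem_ofList _ _).mp hc
    have hcount := hpre.2 c hcm
    have : (pvFil rows c).length = (rows.flatten.map Prod.snd).count c := by
      rw [pvFil, ← List.countP_eq_length_filter, List.count_eq_countP, List.countP_map]
      rfl
    omega
  have hran : ∀ x ∈ pvLB rows, 0 ≤ x.1 ∧ x.1 < 3 ∧ 0 ≤ x.2.1 ∧ x.2.1 < 3 := by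
    intro x hx
    obtain ⟨c, hc, k, hk, hx1⟩ := pvMem_LB rows x hx
    have h1 := hFil3 c hc
    have h2 := List.idxOf_lt_length_of_mem hc
    rw [hx1]
    refine ⟨?_, ?_, ?_, ?_⟩ <;> dsimp only <;> omega
  -- A as a fold over B's write list
  rw [pvA_eq, (pvPermAB rows).foldl_eq' (pvComm rows) pvInit]
  -- compare cell by cell
  apply pvGrid_ext _ _ (pvShape_foldl _ _ pvShape_init) (pvAlt_shape rows)
  intro r c hr hc
  rw [pvGetCell_foldl _ _ pvShape_init hran (pvLB_inj rows) r c,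
      pvAlt_cell rows r c hr hc]
  unfold pvBcell
  by_cases hcS : c < (pvS rows).length
  · have hcmem : (pvS rows)[c] ∈ pvS rows := List.getElem_mem hcS
    have hidx : (pvS rows).idxOf (pvS rows)[c] = c :=
      (PySem.Set.nodup_ofList _).idxOf_getElem c hcS
    by_cases hrF : r < (pvFil rows (pvS rows)[c]).length
    · have hmem := pvLB_mem rows (pvS rows)[c] hcmem r hrF
      have hfind : (pvLB rows).find?
          (fun t => t.1 == (r : Int) && t.2.1 == (c : Int))
          = some ((r : Int), ((pvS rows).idxOf (pvS rows)[c] : Int),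
              (pvFil rows (pvS rows)[c])[r]) := by
        apply pvFind_unique _ _ ?_ _ hmem
        · simp [hidx]
        · intro x hx y hy hpx hpy
          apply pvLB_inj rows x hx y hy
          · have e1 := beq_iff_eq.mp (Bool.and_elim_left hpx)
            have e2 := beq_iff_eq.mp (Bool.and_elim_left hpy)
            omega
          · have e1 := beq_iff_eq.mp (Bool.and_elim_right hpx)
            have e2 := beq_iff_eq.mp (Bool.and_elim_right hpy)
            omega
      rw [hfind, dif_pos hcS]
      simp only [dif_pos hrF]
    · have hfind : (pvLB rows).find?
          (fun t => t.1 == (r : Int) && t.2.1 == (c : Int)) = none := by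
        rw [List.find?_eq_none]
        intro x hx hpx
        obtain ⟨c', hc', k, hk, hx1⟩ := pvMem_LB rows x hx
        have h1 : x.1 = (r : Int) := beq_iff_eq.mp (Bool.and_elim_left hpx)
        have h2 : x.2.1 = (c : Int) := beq_iff_eq.mp (Bool.and_elim_right hpx)
        rw [hx1] at h1 h2
        dsimp only at h1 h2
        have hkr : k = r := by exact_mod_cast h1
        have hic : (pvS rows).idxOf c' = c := by exact_mod_cast h2
        have hceq : c' = (pvS rows)[c] :=
          (List.idxOf_inj hc').mp (by rw [hic, hidx])
        rw [hceq, hkr] at hk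
        omega
      rw [hfind, dif_pos hcS]
      simp only [dif_neg hrF]
      exact (pvGetCell_init r c hr hc)
  · have hfind : (pvLB rows).find?
        (fun t => t.1 == (r : Int) && t.2.1 == (c : Int)) = none := by
      rw [List.find?_eq_none]
      intro x hx hpx
      obtain ⟨c', hc', k, hk, hx1⟩ := pvMem_LB rows x hx
      have h2 : x.2.1 = (c : Int) := beq_iff_eq.mp (Bool.and_elim_right hpx)
      rw [hx1] at h2
      dsimp only at h2
      have hic : (pvS rows).idxOf c' = c := by exact_mod_cast h2
      have := List.idxOf_lt_length_of_mem hc'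
      omega
    rw [hfind, dif_neg hcS]
    exact pvGetCell_init r c hr hc
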